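-- pv_equiv track=rewrite | github.com/elton2024br/instanotLM | python-pipeline/notebooklm_prep.py | _hashtag_index
-- ===== SOURCE A (Python) =====
-- from collections import Counter
--
-- def _hashtag_index(posts: list) -> str:
--     """Índice de hashtags mais usadas."""
--     all_hashtags = []
--     for p in posts:
--         all_hashtags.extend(p.get("caption_hashtags", []))
--
--     if not all_hashtags:
--         return ""
--
--     counter = Counter(all_hashtags)
--     top_30 = counter.most_common(30)
--
--     lines = ["## Índice de Hashtags (Top 30)\n"]
--     for tag, count in top_30:
--         lines.append(f"- **#{tag}** ({count}x)")
--
--     return "\n".join(lines)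
-- ===== SOURCE B (Python) =====
-- def _hashtag_index(posts: list) -> str:
--     """Índice de hashtags mais usadas."""
--     counts = {}
--     for p in posts:
--         for tag in p.get("caption_hashtags", []):
--             counts[tag] = counts.get(tag, 0) + 1
--
--     if not counts:
--         return ""
--
--     # Counting-sort selection: bucket tags by frequency, then walk the
--     # frequencies from the highest down, keeping first-occurrence order inside
--     # each bucket (this is exactly Counter.most_common's stable tie order).
--     buckets = {}
--     maxc = 0
--     for tag, c in counts.items():
--         buckets.setdefault(c, []).append(tag)
--         if c > maxc:
--             maxc = c
--
--     ordered = []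
--     for c in range(maxc, 0, -1):
--         for tag in buckets.get(c, []):
--             ordered.append((tag, c))
--
--     out = "## Índice de Hashtags (Top 30)\n"
--     for tag, c in ordered[:30]:
--         out += f"\n- **#{tag}** ({c}x)"
--     return out
-- ===== Notes on version B (the rewrite author's own statement) =====
-- stated objective: alternative
-- what changed: Replaced Counter + most_common(30) (comparison-based stable-sort/heap selection) by a counting-sort selection: counts are accumulated into a plain dict, tags are bucketed by frequency, and the frequencies are walked from the maximum down to 1 (range(maxc, 0, -1)), which reproduces most_common's stable first-occurrence tie order without any comparison sort.
import Mathlib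
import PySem

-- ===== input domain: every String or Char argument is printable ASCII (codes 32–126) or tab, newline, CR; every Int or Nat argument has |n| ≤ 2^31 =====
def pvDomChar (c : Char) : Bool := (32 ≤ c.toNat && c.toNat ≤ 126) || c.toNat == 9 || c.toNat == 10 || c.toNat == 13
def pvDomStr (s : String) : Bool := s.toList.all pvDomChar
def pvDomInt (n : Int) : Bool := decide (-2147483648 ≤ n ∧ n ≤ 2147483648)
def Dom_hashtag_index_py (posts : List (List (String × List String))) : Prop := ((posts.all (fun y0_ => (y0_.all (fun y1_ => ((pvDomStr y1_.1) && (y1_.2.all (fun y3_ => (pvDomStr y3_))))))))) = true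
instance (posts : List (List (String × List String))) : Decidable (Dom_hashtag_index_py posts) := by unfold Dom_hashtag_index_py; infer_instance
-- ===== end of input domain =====

-- B replaces Counter + most_common(30) (a comparison-based stable sort / heap selection) by a
-- counting-sort selection: tags are bucketed by frequency and the frequencies walked from the
-- maximum down to 1, which reproduces most_common's stable first-occurrence tie order.

-- ===== PORT A =====
-- A: collect all hashtags into a flat list, Counter it, most_common(30)
-- (= stable sort by count, reverse=True, take 30), build the lines list, join.
def hashtag_index_py (posts : List (List (String × List String))) : String :=
  let all_hashtags : List String :=
    posts.foldl (fun acc p => acc ++ (PySem.Dict.mk p).getD "caption_hashtags" []) []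
  if all_hashtags = [] then ""
  else
    let counter := PySem.Dict.counter all_hashtags
    let top_30 := (PySem.List.sorted counter.items (fun kv => kv.2) true).take 30
    let lines := top_30.foldl
      (fun ls tc => ls ++ ["- **#" ++ tc.1 ++ "** (" ++ PySem.Int.toStr tc.2 ++ "x)"])
      ["## Índice de Hashtags (Top 30)\n"]
    PySem.Str.join "\n" lines

-- ===== PORT B =====
-- B: count into a dict in one nested pass, bucket the tags by their count
-- (setdefault(c, []).append(tag) = insert c (getD c [] ++ [tag])) while tracking the maximum
-- count, emit (tag, count) pairs walking range(maxc, 0, -1), slice to 30, format with '+='.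
def hashtag_index_py_alt (posts : List (List (String × List String))) : String :=
  let counts : PySem.Dict String Int :=
    posts.foldl
      (fun d p => ((PySem.Dict.mk p).getD "caption_hashtags" []).foldl
        (fun d tag => d.insert tag (d.getD tag 0 + 1)) d)
      PySem.Dict.empty
  if counts.items = [] then ""
  else
    let bm : PySem.Dict Int (List String) × Int :=
      counts.items.foldl
        (fun s tc =>
          (s.1.insert tc.2 (s.1.getD tc.2 [] ++ [tc.1]),
           if tc.2 > s.2 then tc.2 else s.2))
        (PySem.Dict.empty, 0)
    let ordered : List (String × Int) :=
      (PySem.List.pyRange bm.2 0 (-1)).foldl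
        (fun acc c => (bm.1.getD c []).foldl (fun a tag => a ++ [(tag, c)]) acc) []
    (ordered.take 30).foldl
      (fun out tc => out ++ "\n- **#" ++ tc.1 ++ "** (" ++ PySem.Int.toStr tc.2 ++ "x)")
      "## Índice de Hashtags (Top 30)\n"

-- ===== PRECONDITION & SPEC =====
def Spec_hashtag_index_py (posts : List (List (String × List String))) (out : String) : Prop := out = hashtag_index_py_alt posts
instance (posts : List (List (String × List String))) (out : String) : Decidable (Spec_hashtag_index_py posts out) := by unfold Spec_hashtag_index_py; infer_instance

-- ===== CLAIM (what is proved, stated in full; the proofs are below) =====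
def Claim_equal_hashtag_index_py : Prop := ∀ (posts : List (List (String × List String))), Dom_hashtag_index_py posts → Spec_hashtag_index_py posts (hashtag_index_py posts)

-- ===== LEMMAS AND PROOFS =====

-- '"\n".join(h :: t)' is the '+='-loop over t starting from h.
lemma join_newline_cons_eq_foldl (h : String) (t : List String) :
    PySem.Str.join "\n" (h :: t) = t.foldl (fun acc x => acc ++ "\n" ++ x) h := by
  induction t generalizing h with
  | nil => simp [PySem.Str.join, PySem.Chars.join, List.intercalate]
  | cons y ys ih =>
    have := ih (h ++ "\n" ++ y)
    rw [List.foldl_cons, ← this]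
    cases ys <;> simp [PySem.Str.join, PySem.Chars.join, List.intercalate]

lemma ofList_ne_nil {α : Type} [BEq α] [LawfulBEq α] (xs : List α) (h : xs ≠ []) :
    PySem.Set.ofList xs ≠ [] := by
  cases xs with
  | nil => simp at h
  | cons a t =>
    intro he
    have := (PySem.Set.mem_ofList (y := a) (xs := a :: t)).2 (by simp)
    simp [he] at this

-- range(m, 0, -1) is [m, m-1, …, 1].
lemma pyRange_down (m : Int) :
    PySem.List.pyRange m 0 (-1) = (List.range m.toNat).map (fun k : Nat => m - (k : Int)) := by
  simp only [PySem.List.pyRange, if_neg (show ¬ (-1:Int) = 0 by norm_num),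
    if_neg (show ¬ (0:Int) < -1 by norm_num)]
  by_cases hm : (0:Int) < m
  · rw [if_pos hm, show (m - 0 + - -1 - 1) / - -1 = m by norm_num]
    apply List.map_congr_left; intro k _; ring
  · rw [if_neg hm, show m.toNat = 0 from by omega]
    simp

-- the bucket dict built by 'setdefault(c, []).append(tag)' over l: bucket c holds the first
-- components of l's pairs whose second component is c, in l's order.
lemma getD_group (l : List (String × Int)) (d : PySem.Dict Int (List String)) (c : Int) :
    (l.foldl (fun d tc => d.insert tc.2 (d.getD tc.2 [] ++ [tc.1])) d).getD c []
      = d.getD c [] ++ (l.filter (fun tc => tc.2 == c)).map (·.1) := by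
  induction l generalizing d with
  | nil => simp
  | cons tc t ih =>
    rw [List.foldl_cons, ih]
    by_cases hc : tc.2 = c
    · simp [hc, PySem.Dict.getD_insert_self]
    · simp [hc, PySem.Dict.getD_insert_of_ne _ _ _ (by exact fun h => hc h.symm)]

-- pairing the bucket's tags back with their count recovers the filtered items.
lemma map_fst_filter_snd (l : List (String × Int)) (c : Int) :
    ((l.filter (fun tc => tc.2 == c)).map (·.1)).map (fun t => (t, c))
      = l.filter (fun tc => tc.2 == c) := by
  induction l with
  | nil => simp
  | cons tc t ih =>
    rw [List.filter_cons]
    by_cases hc : tc.2 = c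
    · simp [hc, ih]
      exact (Prod.ext rfl hc.symm)
    · simp [hc, ih]

lemma insertBy_append_left {α : Type} (before : α → α → Bool) (x : α) (l1 l2 : List α)
    (h : ∀ y ∈ l1, before x y = false) :
    PySem.List.insertBy before x (l1 ++ l2) = l1 ++ PySem.List.insertBy before x l2 := by
  induction l1 with
  | nil => simp
  | cons a t ih =>
    simp only [List.cons_append, PySem.List.insertBy, h a (by simp)]
    simp
    exact ih (fun y hy => h y (by simp [hy]))

-- inserting x into a bucket-concatenated list places it at the end of its own bucket.
lemma insertBy_flatMap {α : Type} (key : α → Int) (x : α) (p : List α) (vs : List Int)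
    (hvs : vs.Pairwise (fun a b => b < a)) (hx : key x ∈ vs) :
    PySem.List.insertBy (fun a b => decide (key b < key a)) x
        (vs.flatMap (fun v => p.filter (fun y => key y == v)))
      = vs.flatMap (fun v => (p ++ [x]).filter (fun y => key y == v)) := by
  induction vs with
  | nil => simp at hx
  | cons v vs' ih =>
    have hlt : ∀ v' ∈ vs', v' < v := (List.pairwise_cons.1 hvs).1
    have hvs' : vs'.Pairwise (fun a b => b < a) := (List.pairwise_cons.1 hvs).2
    simp only [List.flatMap_cons]
    by_cases hkv : key x = v
    · rw [insertBy_append_left _ _ _ _ (by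
        intro y hy
        have : key y = v := by simpa using List.of_mem_filter hy
        simp [this, hkv])]
      have hstep : PySem.List.insertBy (fun a b => decide (key b < key a)) x
          (vs'.flatMap (fun v => p.filter (fun y => key y == v)))
          = x :: vs'.flatMap (fun v => p.filter (fun y => key y == v)) := by
        cases hl : vs'.flatMap (fun v => p.filter (fun y => key y == v)) with
        | nil => simp [PySem.List.insertBy]
        | cons y0 t =>
          have hy0 : y0 ∈ vs'.flatMap (fun v => p.filter (fun y => key y == v)) := by
            rw [hl]; simp
          obtain ⟨v', hv', hy0f⟩ := List.mem_flatMap.1 hy0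
          have hkey : key y0 = v' := by simpa using List.of_mem_filter hy0f
          have : key y0 < key x := by rw [hkey, hkv]; exact hlt _ hv'
          simp [PySem.List.insertBy, this]
      rw [hstep]
      have h1 : (p ++ [x]).filter (fun y => key y == v) = p.filter (fun y => key y == v) ++ [x] := by
        simp [List.filter_append, hkv]
      have h2 : vs'.flatMap (fun v => (p ++ [x]).filter (fun y => key y == v))
          = vs'.flatMap (fun v => p.filter (fun y => key y == v)) := by
        apply List.flatMap_congr
        intro v' hv'
        have : key x ≠ v' := by rw [hkv]; exact fun h => absurd (h ▸ hlt _ hv') (lt_irrefl v)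
        simp [List.filter_append, this]
      rw [h1, h2]
      simp
    · have hxvs' : key x ∈ vs' := by
        rcases List.mem_cons.1 hx with h | h
        · exact absurd h hkv
        · exact h
      have hxv : key x < v := hlt _ hxvs'
      rw [insertBy_append_left _ _ _ _ (by
        intro y hy
        have : key y = v := by simpa using List.of_mem_filter hy
        simp [this]; omega)]
      rw [ih hvs' hxvs']
      have : (p ++ [x]).filter (fun y => key y == v) = p.filter (fun y => key y == v) := by
        simp [List.filter_append, hkv]
      rw [this]

-- stable descending sort = concatenation of the buckets in strictly descending key order.
lemma sorted_rev_eq_flatMap_filter {α : Type} (xs : List α) (key : α → Int) (vs : List Int)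
    (hvs : vs.Pairwise (fun a b => b < a)) (hcov : ∀ x ∈ xs, key x ∈ vs) :
    PySem.List.sorted xs key true = vs.flatMap (fun v => xs.filter (fun y => key y == v)) := by
  rw [PySem.List.sorted_rev_eq_foldl_insertBy]
  induction xs using List.reverseRecOn with
  | nil => simp
  | append_singleton p x ih =>
    rw [List.foldl_append, List.foldl_cons, List.foldl_nil]
    rw [ih (fun y hy => hcov y (by simp [hy]))]
    exact insertBy_flatMap key x p vs hvs (hcov x (by simp))

-- ===== VERDICT (by name: the statement is the Claim_ definition above) =====
theorem hashtag_index_py_spec : Claim_equal_hashtag_index_py := by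
  intro posts _
  unfold Spec_hashtag_index_py hashtag_index_py hashtag_index_py_alt
  simp only [PySem.List.foldl_append_eq_flatMap, List.nil_append]
  set flat : List String :=
    posts.flatMap (fun p => (PySem.Dict.mk p).getD "caption_hashtags" []) with hflat
  -- B's counting dict is Counter(flat)
  have hcounts :
      posts.foldl
        (fun d p => ((PySem.Dict.mk p).getD "caption_hashtags" []).foldl
          (fun d tag => d.insert tag (d.getD tag 0 + 1)) d)
        PySem.Dict.empty = PySem.Dict.counter flat := by
    rw [hflat, ← PySem.Dict.foldl_insert_getD_add_one_eq_counter, List.foldl_flatMap]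
  rw [hcounts]
  by_cases hnil : flat = []
  · simp [hnil, PySem.Dict.counter,
      show (PySem.Dict.empty : PySem.Dict String Int).items = [] from rfl]
  · rw [if_neg hnil]
    have hitems : (PySem.Dict.counter flat).items ≠ [] := by
      rw [PySem.Dict.items_counter]
      simp [ofList_ne_nil flat hnil]
    rw [if_neg hitems]
    set items := (PySem.Dict.counter flat).items with hitemsdef
    -- B's single loop with two accumulators is two loops
    rw [PySem.List.foldl_prod_mk
      (f := fun (d : PySem.Dict Int (List String)) (tc : String × Int) =>
        d.insert tc.2 (d.getD tc.2 [] ++ [tc.1]))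
      (g := fun (m : Int) (tc : String × Int) => if tc.2 > m then tc.2 else m)]
    dsimp only
    set buckets := items.foldl
      (fun (d : PySem.Dict Int (List String)) tc => d.insert tc.2 (d.getD tc.2 [] ++ [tc.1]))
      PySem.Dict.empty with hbdef
    set maxc := items.foldl (fun (m : Int) tc => if tc.2 > m then tc.2 else m) 0 with hmdef
    -- every count is ≤ maxc
    have hmax : ∀ tc ∈ items, tc.2 ≤ maxc := by
      have hcongr : items.foldl (fun (m : Int) tc => if tc.2 > m then tc.2 else m) 0
          = items.foldl (fun (m : Int) tc => max m tc.2) 0 :=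
        PySem.List.foldl_congr_mem _ _ _ _ (by intro acc tc _; omega)
      intro tc htc
      rw [hmdef, hcongr]
      exact (PySem.List.le_foldl_max_int items (·.2) 0).2 tc htc
    -- every count is ≥ 1
    have hpos : ∀ tc ∈ items, 1 ≤ tc.2 := by
      intro tc htc
      rw [hitemsdef, PySem.Dict.items_counter] at htc
      obtain ⟨k, hk, rfl⟩ := List.mem_map.1 htc
      have : k ∈ flat := (PySem.Set.mem_ofList _ _).1 hk
      have := List.count_pos_iff.2 this
      simpa using this
    -- the descending frequency list
    have hvsP : (PySem.List.pyRange maxc 0 (-1)).Pairwise (fun a b => b < a) := by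
      rw [pyRange_down, List.pairwise_map]
      exact (List.pairwise_lt_range).imp (by intro i j hij; omega)
    have hcov : ∀ tc ∈ items, tc.2 ∈ PySem.List.pyRange maxc 0 (-1) := by
      intro tc htc
      rw [pyRange_down]
      refine List.mem_map.2 ⟨(maxc - tc.2).toNat, List.mem_range.2 ?_, ?_⟩
      · have := hmax tc htc; have := hpos tc htc; omega
      · have := hmax tc htc; have := hpos tc htc; omega
    -- B's ordered list is exactly A's stable descending sort
    have hordered :
        (PySem.List.pyRange maxc 0 (-1)).flatMap
          (fun c => (buckets.getD c []).flatMap (fun tag => [(tag, c)]))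
        = PySem.List.sorted items (fun kv => kv.2) true := by
      have hinner : ∀ c : Int,
          (buckets.getD c []).flatMap (fun tag => [(tag, c)])
            = items.filter (fun tc => tc.2 == c) := by
        intro c
        rw [← List.map_eq_flatMap, hbdef, getD_group,
          show (PySem.Dict.empty : PySem.Dict Int (List String)).getD c [] = [] from rfl,
          List.nil_append, map_fst_filter_snd]
      rw [List.flatMap_congr (fun c _ => hinner c)]
      exact (sorted_rev_eq_flatMap_filter items (fun kv => kv.2)
        (PySem.List.pyRange maxc 0 (-1)) hvsP hcov).symm
    rw [hordered]
    -- formatting: A's lines list + join = B's '+=' loop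
    rw [← List.map_eq_flatMap, List.singleton_append, join_newline_cons_eq_foldl,
      List.foldl_map]
    congr 1
    funext acc tc
    have : ("\n" : String) ++ "- **#" = "\n- **#" := by decide
    simp only [← this, String.append_assoc]
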